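-- pv_equiv track=rewrite | github.com/theVikingMan/LeetCode | AlgoExpert/Arrays/MaxExpression.py | maximizeExpression
-- ===== SOURCE A (Python) =====
-- def maximizeExpression(array):
--     if len(array) < 4:
--         return 0
--
--     dp = {}
--     def helper(i, curr, prev):
--         if i == 0:
--             return curr
--         if (i, curr) in dp:
--             return dp[(i, curr)]
--         temp = float('-inf')
--         for j in range(prev+1, len(array) - i + 1):
--             if i % 2:
--                 temp = max(temp, helper(i-1, curr - array[j], j))
--             else:
--                 temp = max(temp, helper(i-1, curr + array[j], j))
--         dp[(i, curr)] = temp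
--         return dp[(i, curr)]
--
--     return helper(4, 0, -1)
-- ===== SOURCE B (Python) =====
-- def maximizeExpression(array):
--     n = len(array)
--     if n < 4:
--         return 0
--     NEG = float('-inf')
--     dp = {}
--     # frame = (i, curr, j, temp): level i, accumulated expression value curr,
--     # next candidate index j, best-so-far temp.  ret carries a finished value
--     # back to the frame below it on the stack.
--     stack = [(4, 0, 0, NEG)]
--     ret = None
--     while stack:
--         i, curr, j, temp = stack.pop()
--         if ret is not None:
--             temp = max(temp, ret)
--             ret = None
--         if j > n - i:
--             dp[(i, curr)] = temp
--             ret = temp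
--             continue
--         x = array[j]
--         sub = curr - x if i % 2 else curr + x
--         stack.append((i, curr, j + 1, temp))
--         if i == 1:
--             ret = sub
--         elif (i - 1, sub) in dp:
--             ret = dp[(i - 1, sub)]
--         else:
--             stack.append((i - 1, sub, j + 1, NEG))
--     return ret
-- ===== Notes on version B (the rewrite author's own statement) =====
-- stated objective: alternative
-- what changed: A's nested memoized recursion (helper with a dp dict keyed by (i,curr), whose result is order-dependent because the key ignores prev) is replaced by an iterative explicit-stack machine: a while loop over frames (i, curr, j, temp) with a return register, performing the identical memoized search without recursion.
import Mathlib
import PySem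

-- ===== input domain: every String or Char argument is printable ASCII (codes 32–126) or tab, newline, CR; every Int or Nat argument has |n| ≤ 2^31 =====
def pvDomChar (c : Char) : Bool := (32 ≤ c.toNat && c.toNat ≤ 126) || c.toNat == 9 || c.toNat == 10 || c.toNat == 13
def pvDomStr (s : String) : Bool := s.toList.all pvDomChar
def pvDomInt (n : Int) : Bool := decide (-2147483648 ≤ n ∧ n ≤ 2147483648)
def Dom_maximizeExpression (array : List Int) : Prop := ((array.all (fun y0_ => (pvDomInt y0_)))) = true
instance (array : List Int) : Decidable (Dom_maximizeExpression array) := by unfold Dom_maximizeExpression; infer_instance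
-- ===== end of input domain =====

-- B re-implements A's exact (order-dependent, memoized) search as an iterative
-- explicit-stack machine instead of nested recursion; objective: alternative
-- decomposition, same complexity.

-- max with none = float('-inf')
def pvOmax : Option Int → Option Int → Option Int
  | none, b => b
  | some x, none => some x
  | some x, some y => some (max x y)

def PvDP := PySem.Dict (Nat × Int) (Option Int)

-- fold a pending return value (if ret is not None: temp = max(temp, ret))
def pvFold (t : Option Int) : Option (Option Int) → Option Int
  | some v => pvOmax t v
  | none => t

-- array[j], always in range in reachable calls
def pvGet (array : List Int) (j : Int) : Int := (PySem.List.pyGet? array j).getD 0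

-- ===== PORT A =====
-- helper(i, curr, prev); the inner 'for j in range(prev+1, n-i+1)' loop is the
-- structural recursion scanA over j with the same state (temp, dp).
-- termination lemma for scanA (cited by name in decreasing_by)
theorem pvDecScan (n : Int) (lv : Nat) (j : Int) (h : ¬ j > n - lv) :
    (n - lv + 1 - (j+1)).toNat < (n - lv + 1 - j).toNat := by omega

mutual
def helperA (array : List Int) (n : Int) : Nat → Int → Int → PvDP → Option Int × PvDP
  | 0, curr, _, dp => (some curr, dp)
  | (i+1), curr, prev, dp =>
    match PySem.Dict.get? dp (i+1, curr) with
    | some v => (v, dp)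
    | none =>
      let p := scanA array n i (i+1) curr (prev+1) none dp
      (p.1, PySem.Dict.insert p.2 (i+1, curr) p.1)
termination_by i _ _ _ => ((i : Nat), 1, (0 : Nat))
decreasing_by
  exact Prod.Lex.left _ _ (Nat.lt_succ_self _)

-- the loop of helper at level i+1 (k is the level's predecessor, lv = k+1 = i)
def scanA (array : List Int) (n : Int) (k : Nat) (lv : Nat) (curr : Int) (j : Int)
    (temp : Option Int) (dp : PvDP) : Option Int × PvDP :=
  if _h : j > n - lv then (temp, dp)
  else
    let x := pvGet array j
    let sub := if lv % 2 = 1 then curr - x else curr + x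
    let q := helperA array n k sub j dp
    scanA array n k lv curr (j+1) (pvOmax temp q.1) q.2
termination_by (k, (2 : Nat), (n - lv + 1 - j).toNat)
decreasing_by
  · exact Prod.Lex.right _ (Prod.Lex.left _ _ (Nat.lt_succ_self _))
  · exact Prod.Lex.right _ (Prod.Lex.right _ (pvDecScan n lv j _h))
end

def maximizeExpression (array : List Int) : Int :=
  if array.length < 4 then 0
  else ((helperA array array.length 4 0 (-1) PySem.Dict.empty).1).getD 0

-- ===== PORT B =====
structure PvFrame where
  i : Nat
  curr : Int
  j : Nat
  temp : Option Int

def pvW (n : Int) (f : PvFrame) : Nat :=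
  (n - f.i + 1 - f.j).toNat * ((n+1).toNat + 4) ^ f.i + 1

def pvFlag : Option (Option Int) → Nat
  | some _ => 0
  | none => 1

def pvMeasure (n : Int) (st : List PvFrame) (ret : Option (Option Int)) : Nat :=
  (st.map (pvW n)).sum + pvFlag ret

-- termination lemmas for runB (cited by name in decreasing_by)
theorem pvDecFinish (n : Int) (f : PvFrame) (st : List PvFrame)
    (ret : Option (Option Int)) (t : Option Int) :
    pvMeasure n st (some t) < pvMeasure n (f :: st) ret := by
  simp only [pvMeasure, pvW, List.map_cons, List.sum_cons, pvFlag]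
  generalize (n - f.i + 1 - f.j).toNat * ((n+1).toNat + 4) ^ f.i = q
  generalize (List.map (pvW n) st).sum = S
  generalize pvFlag ret = F
  omega

theorem pvDecParent (n : Int) (f : PvFrame) (st : List PvFrame)
    (ret : Option (Option Int)) (v t : Option Int)
    (h : ¬((f.j : Int) > n - f.i)) :
    pvMeasure n (⟨f.i, f.curr, f.j + 1, t⟩ :: st) (some v) < pvMeasure n (f :: st) ret := by
  simp only [pvMeasure, pvW, List.map_cons, List.sum_cons, pvFlag]
  have hc : (n - (f.i:Int) + 1 - ((f.j+1 : Nat):Int)).toNat + 1 = (n - f.i + 1 - (f.j:Int)).toNat := by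
    omega
  rw [← hc]
  have hp : 0 < ((n+1).toNat + 4) ^ f.i := pow_pos (by omega) _
  generalize ((n+1).toNat + 4) ^ f.i = P at hp ⊢
  generalize (n - (f.i:Int) + 1 - ((f.j+1 : Nat):Int)).toNat = C
  generalize (List.map (pvW n) st).sum = S
  generalize pvFlag ret = F
  have m1 : (C + 1) * P = C * P + P := Nat.succ_mul _ _
  omega

theorem pvDecChild (n : Int) (f : PvFrame) (st : List PvFrame)
    (ret : Option (Option Int)) (c : Int) (t : Option Int)
    (h : ¬((f.j : Int) > n - f.i)) (h1 : ¬ (f.i - 1 = 0)) :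
    pvMeasure n (⟨f.i - 1, c, f.j + 1, none⟩ :: ⟨f.i, f.curr, f.j + 1, t⟩ :: st) none
      < pvMeasure n (f :: st) ret := by
  simp only [pvMeasure, pvW, List.map_cons, List.sum_cons, pvFlag]
  have hi2 : 2 ≤ f.i := by omega
  have e1 : (n - ((f.i - 1 : Nat):Int) + 1 - ((f.j+1 : Nat):Int)).toNat = (n - f.i + 1 - (f.j:Int)).toNat := by
    omega
  have e2 : (n - (f.i:Int) + 1 - ((f.j+1 : Nat):Int)).toNat + 1 = (n - f.i + 1 - (f.j:Int)).toNat := by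
    omega
  have e3 : (n - (f.i:Int) + 1 - ((f.j+1 : Nat):Int)).toNat + 1 ≤ (n+1).toNat := by
    omega
  rw [e1, ← e2]
  have hpow : ((n+1).toNat + 4) ^ f.i = ((n+1).toNat + 4) ^ (f.i - 1) * ((n+1).toNat + 4) := by
    conv_lhs => rw [show f.i = (f.i - 1) + 1 by omega]
    rw [pow_succ]
  rw [hpow]
  have hp1 : 0 < ((n+1).toNat + 4) ^ (f.i - 1) := pow_pos (by omega) _
  generalize ((n+1).toNat + 4) ^ (f.i - 1) = P at hp1 ⊢
  generalize (n - (f.i:Int) + 1 - ((f.j+1 : Nat):Int)).toNat = C at e3 ⊢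
  generalize hB : (n+1).toNat = B at e3 ⊢
  generalize (List.map (pvW n) st).sum = S
  have m1 : (C + 1) * (P * (B + 4)) = C * (P * (B + 4)) + P * (B + 4) := Nat.succ_mul _ _
  have m2 : P * (B + 4) = P * B + P * 4 := Nat.mul_add _ _ _
  have m3 : (C + 1) * P ≤ B * P := Nat.mul_le_mul_right _ e3
  have m4 : B * P = P * B := Nat.mul_comm _ _
  generalize pvFlag ret = F
  omega

def runB (array : List Int) (n : Int) :
    List PvFrame → PvDP → Option (Option Int) → Option Int
  | [], _dp, ret => ret.getD none
  | f :: st, dp, ret =>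
    let temp' := pvFold f.temp ret
    if _h : (f.j : Int) > n - f.i then
      runB array n st (PySem.Dict.insert dp (f.i, f.curr) temp') (some temp')
    else
      let x := pvGet array f.j
      let sub := if f.i % 2 = 1 then f.curr - x else f.curr + x
      let parent : PvFrame := ⟨f.i, f.curr, f.j + 1, temp'⟩
      if _h1 : f.i - 1 = 0 then runB array n (parent :: st) dp (some (some sub))
      else if _h2 : PySem.Dict.contains dp (f.i - 1, sub) = true then
        runB array n (parent :: st) dp (some (PySem.Dict.getD dp (f.i - 1, sub) none))
      else runB array n (⟨f.i - 1, sub, f.j + 1, none⟩ :: parent :: st) dp none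
termination_by st dp ret => pvMeasure n st ret
decreasing_by
  · exact pvDecFinish n f st ret _
  · exact pvDecParent n f st ret _ _ _h
  · exact pvDecParent n f st ret _ _ _h
  · exact pvDecChild n f st ret _ _ _h _h1

def maximizeExpression_alt (array : List Int) : Int :=
  if array.length < 4 then 0
  else (runB array array.length [⟨4, 0, 0, none⟩] PySem.Dict.empty none).getD 0

-- ===== PRECONDITION & SPEC =====
def Spec_maximizeExpression (array : List Int) (out : Int) : Prop := out = maximizeExpression_alt array
instance (array : List Int) (out : Int) : Decidable (Spec_maximizeExpression array out) := by unfold Spec_maximizeExpression; infer_instance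

-- ===== CLAIM (what is proved, stated in full; the proofs are below) =====
def Claim_equal_maximizeExpression : Prop := ∀ (array : List Int), Dom_maximizeExpression array → Spec_maximizeExpression array (maximizeExpression array)

-- ===== LEMMAS AND PROOFS =====

theorem pv_fold (array : List Int) (n : Int) (f : PvFrame) (st : List PvFrame)
    (dp : PvDP) (v : Option Int) :
    runB array n (f :: st) dp (some v) =
      runB array n (⟨f.i, f.curr, f.j, pvOmax f.temp v⟩ :: st) dp none := by
  rw [runB, runB]
  simp only [pvFold]

theorem pv_sim (array : List Int) (n : Int) (k : Nat) (j : Nat)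
    (curr : Int) (temp : Option Int) (dp : PvDP) (st : List PvFrame) :
    runB array n (⟨k+1, curr, j, temp⟩ :: st) dp none =
      runB array n st
        (PySem.Dict.insert (scanA array n k (k+1) curr j temp dp).2 (k+1, curr)
          (scanA array n k (k+1) curr j temp dp).1)
        (some (scanA array n k (k+1) curr j temp dp).1) := by
  rw [runB, scanA]
  by_cases hj : ((j : Int) > n - ((k+1 : Nat) : Int))
  · simp only [dif_pos hj]
    rfl
  · simp only [dif_neg hj]
    have hcast : ((j : Int) + 1) = (((j + 1 : Nat)) : Int) := by push_cast; ring
    match k with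
    | 0 =>
      simp only [Nat.add_sub_cancel, reduceDIte, helperA]
      rw [pv_fold]
      simp only [pvFold]
      rw [hcast, pv_sim array n 0 (j+1)]
    | (m+1) =>
      simp only [Nat.add_sub_cancel]
      have hne : ¬ (m + 1 = 0) := by omega
      simp only [dif_neg hne, helperA]
      by_cases hc2 : PySem.Dict.contains dp (m + 1, if (m+1+1) % 2 = 1 then curr - pvGet array j else curr + pvGet array j) = true
      · obtain ⟨v, hv⟩ : ∃ v, PySem.Dict.get? dp (m + 1, if (m+1+1) % 2 = 1 then curr - pvGet array j else curr + pvGet array j) = some v := by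
          rw [PySem.Dict.contains_eq_isSome_get?] at hc2
          exact Option.isSome_iff_exists.mp hc2
        have hgd := PySem.Dict.getD_of_get?_eq_some (d := dp) (d0 := none) hv
        simp only [dif_pos hc2, hv, hgd]
        rw [pv_fold]
        simp only [pvFold]
        rw [hcast, pv_sim array n (m+1) (j+1)]
      · have hv : PySem.Dict.get? dp (m + 1, if (m+1+1) % 2 = 1 then curr - pvGet array j else curr + pvGet array j) = none := by
          rw [PySem.Dict.contains_eq_isSome_get?] at hc2
          exact Option.not_isSome_iff_eq_none.mp (by simpa using hc2)
        simp only [dif_neg hc2, hv]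
        rw [hcast, pv_sim array n m (j+1)]
        rw [pv_fold]
        simp only [pvFold]
        rw [pv_sim array n (m+1) (j+1)]
termination_by ((k : Nat), (n - ((k+1 : Nat) : Int) + 1 - (j : Int)).toNat)
decreasing_by
  all_goals first
    | exact Prod.Lex.right _ (by omega)
    | exact Prod.Lex.left _ _ (by omega)

-- ===== VERDICT (by name: the statement is the Claim_ definition above) =====
theorem maximizeExpression_spec : Claim_equal_maximizeExpression := by
  unfold Claim_equal_maximizeExpression Spec_maximizeExpression
  intro array _
  unfold maximizeExpression maximizeExpression_alt
  by_cases h4 : array.length < 4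
  · simp [h4]
  · simp only [if_neg h4]
    rw [helperA]
    simp only [PySem.Dict.get?_empty]
    have h0 : ((-1 : Int) + 1) = ((0 : Nat) : Int) := by norm_num
    rw [h0, pv_sim array (array.length) 3 0 0 none PySem.Dict.empty []]
    rw [runB]
    rfl
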